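-- pv_equiv track=rewrite | github.com/nicholasbailey87/2024_07_08_speaker_agent_sizes | neural-ilm-1/texrel/relations.py | class_name_to_name
-- ===== SOURCE A (Python) =====
-- def class_name_to_name(class_name):
--     case_transitions = []
--     class_name = class_name.replace('_', '-')
--     for i, c in enumerate(class_name):
--         if c != class_name[i].lower():
--             case_transitions.append(i)
--     name = ''
--     for i, case_transition in enumerate(case_transitions):
--         if i > 0:
--             name += '-'
--         if i == len(case_transitions) - 1:
--             segment = class_name[case_transition:]
--         else:
--             segment = class_name[case_transition:case_transitions[i + 1]]
--         name += segment.lower()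
--     name = name.replace('--', '-')
--     return name
-- ===== SOURCE B (Python) =====
-- def class_name_to_name(class_name):
--     class_name = class_name.replace('_', '-')
--     out = []
--     seen_upper = False
--     for c in class_name:
--         if c != c.lower():
--             if seen_upper:
--                 out.append('-')
--             seen_upper = True
--         if seen_upper:
--             out.append(c.lower())
--     return ''.join(out).replace('--', '-')
-- ===== Notes on version B (the rewrite author's own statement) =====
-- stated objective: simpler
-- what changed: A collects all uppercase-transition indices into a list and then re-scans the string, slicing between consecutive indices and joining the lowercased segments; B makes one forward pass with a seen-an-uppercase flag, emitting each lowercased character directly and inserting a dash before every uppercase after the first.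
import Mathlib
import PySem

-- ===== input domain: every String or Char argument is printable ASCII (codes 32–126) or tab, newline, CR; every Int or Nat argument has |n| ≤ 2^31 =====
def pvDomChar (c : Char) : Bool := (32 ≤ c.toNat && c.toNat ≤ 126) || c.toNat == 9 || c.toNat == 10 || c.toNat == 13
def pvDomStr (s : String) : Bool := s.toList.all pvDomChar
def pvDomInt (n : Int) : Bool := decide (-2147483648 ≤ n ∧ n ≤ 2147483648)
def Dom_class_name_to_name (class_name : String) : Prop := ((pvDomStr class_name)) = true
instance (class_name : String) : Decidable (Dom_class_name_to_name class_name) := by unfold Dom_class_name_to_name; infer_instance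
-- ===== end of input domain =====

-- B replaces A's two-phase transition-index-list + slicing construction by a single
-- forward pass with a seen-an-uppercase flag (objective: simpler, same O(n) cost).

-- ===== PORT A =====
-- A-side helper: the body of A's second loop ('for i, case_transition in enumerate(case_transitions)').
-- 'class_name[case_transition:case_transitions[i + 1]]' is ported with 'PySem.List.pyGet? ts (p.1 + 1)';
-- Python never indexes out of range here (i is not the last index), so the 'none' branch of the slice
-- bound never occurs.
def pvBodyA (cs : List Char) (ts : List Int) (name : List Char) (p : Int × Int) : List Char :=
  let name := if p.1 > 0 then name ++ ['-'] else name
  let seg := if p.1 = (ts.length : Int) - 1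
             then PySem.List.slice cs (some p.2) none
             else PySem.List.slice cs (some p.2) (PySem.List.pyGet? ts (p.1 + 1))
  name ++ PySem.Chars.lower seg

-- In the first loop, 'class_name[i].lower()' is 'PySem.Chars.lowerChar p.2': for '(i, c)' produced by
-- enumerate, class_name[i] is exactly c (exact, never out of range).
def class_name_to_name (class_name : String) : String :=
  let cs := (PySem.Str.replace class_name "_" "-").toList
  let ts : List Int := (PySem.List.enumerate cs 0).foldl
    (fun acc p => if p.2 ≠ PySem.Chars.lowerChar p.2 then acc ++ [p.1] else acc) []
  let name : List Char := (PySem.List.enumerate ts 0).foldl (pvBodyA cs ts) []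
  PySem.Str.replace (String.ofList name) "--" "-"

-- ===== PORT B =====
-- B-side helper: the body of B's single loop ('for c in class_name').
def pvStepB (st : List Char × Bool) (c : Char) : List Char × Bool :=
  let st := if c ≠ PySem.Chars.lowerChar c then
      ((if st.2 then st.1 ++ ['-'] else st.1), true)
    else st
  (if st.2 then st.1 ++ [PySem.Chars.lowerChar c] else st.1, st.2)

def class_name_to_name_alt (class_name : String) : String :=
  let cs := (PySem.Str.replace class_name "_" "-").toList
  let st := cs.foldl pvStepB ([], false)
  PySem.Str.replace (String.ofList st.1) "--" "-"

-- ===== PRECONDITION & SPEC =====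
def Spec_class_name_to_name (class_name : String) (out : String) : Prop := out = class_name_to_name_alt class_name
instance (class_name : String) (out : String) : Decidable (Spec_class_name_to_name class_name out) := by unfold Spec_class_name_to_name; infer_instance

-- ===== CLAIM (what is proved, stated in full; the proofs are below) =====
def Claim_equal_class_name_to_name : Prop := ∀ (class_name : String), Dom_class_name_to_name class_name → Spec_class_name_to_name class_name (class_name_to_name class_name)

-- ===== LEMMAS AND PROOFS =====

-- 'c is not uppercase' (Python's 'c == c.lower()').
def pvPred (c : Char) : Bool := c == PySem.Chars.lowerChar c

-- What both programs emit after the first uppercase: each char lowercased, a '-' in front of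
-- every further uppercase.
def pvF (cs : List Char) : List Char :=
  cs.flatMap (fun c => if c ≠ PySem.Chars.lowerChar c then ['-', PySem.Chars.lowerChar c] else [PySem.Chars.lowerChar c])

-- The common value of both loops, before the final replace('--','-').
def pvCore (cs : List Char) : List Char :=
  match cs.dropWhile pvPred with
  | [] => []
  | c :: r => PySem.Chars.lowerChar c :: pvF r

-- The uppercase positions of cs, offset by s (A's 'case_transitions').
def pvT : List Char → Nat → List Int
  | [], _ => []
  | c :: r, s => (if c ≠ PySem.Chars.lowerChar c then [((s : Nat) : Int)] else []) ++ pvT r (s + 1)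

-- A's second loop as a recursion over the transition list.
def pvG (cs : List Char) : List Int → List Char
  | [] => []
  | [t] => PySem.Chars.lower (PySem.List.slice cs (some t) none)
  | t :: u :: r => PySem.Chars.lower (PySem.List.slice cs (some t) (some u)) ++ ['-'] ++ pvG cs (u :: r)

lemma pvT_append (xs ys : List Char) : ∀ s : Nat, pvT (xs ++ ys) s = pvT xs s ++ pvT ys (s + xs.length) := by
  induction xs with
  | nil => simp [pvT]
  | cons c r ih =>
    intro s
    simp only [List.cons_append, pvT, ih (s + 1), List.append_assoc, List.length_cons]
    ring_nf

lemma pvT_pred (xs : List Char) : ∀ s : Nat, (∀ c ∈ xs, pvPred c = true) → pvT xs s = [] := by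
  induction xs with
  | nil => simp [pvT]
  | cons c r ih =>
    intro s h
    have hc : c = PySem.Chars.lowerChar c := by
      have := h c (by simp); simpa [pvPred] using this
    have hcond : ¬ (c ≠ PySem.Chars.lowerChar c) := by simpa using hc
    simp [pvT, if_neg hcond, ih (s + 1) (fun d hd => h d (by simp [hd]))]

lemma pvF_pred (xs : List Char) (h : ∀ c ∈ xs, pvPred c = true) :
    pvF xs = xs.map PySem.Chars.lowerChar := by
  induction xs with
  | nil => rfl
  | cons c r ih =>
    have hc : c = PySem.Chars.lowerChar c := by
      have := h c (by simp); simpa [pvPred] using this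
    have hcond : ¬ (c ≠ PySem.Chars.lowerChar c) := by simpa using hc
    rw [pvF, List.flatMap_cons, if_neg hcond, List.map_cons, ← pvF,
      ih (fun d hd => h d (by simp [hd]))]
    rfl

lemma pvF_append (xs ys : List Char) : pvF (xs ++ ys) = pvF xs ++ pvF ys := by
  simp [pvF]

lemma pvDropWhile_head {p : Char → Bool} {cs : List Char} {d : Char} {r : List Char}
    (h : cs.dropWhile p = d :: r) : p d = false := by
  induction cs with
  | nil => simp [List.dropWhile] at h
  | cons c cs ih =>
    by_cases hc : p c
    · exact ih (by simpa [List.dropWhile, hc] using h)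
    · rw [List.dropWhile_cons_of_neg hc] at h
      cases h; simpa using hc

-- A's first loop computes pvT.
lemma pvTs_eq (cs : List Char) : ∀ (s : Nat) (acc : List Int),
    (PySem.List.enumerate cs ((s : Nat) : Int)).foldl
      (fun acc p => if p.2 ≠ PySem.Chars.lowerChar p.2 then acc ++ [p.1] else acc) acc
    = acc ++ pvT cs s := by
  induction cs with
  | nil => intro s acc; simp [PySem.List.enumerate_nil, pvT]
  | cons c r ih =>
    intro s acc
    rw [PySem.List.enumerate_cons]
    have hcast : ((s : Nat) : Int) + 1 = (((s + 1 : Nat)) : Int) := by push_cast; ring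
    by_cases h : c ≠ PySem.Chars.lowerChar c
    · simp only [List.foldl_cons, if_pos h, hcast, ih (s + 1)]
      simp [pvT, h]
    · simp only [List.foldl_cons, if_neg h, hcast, ih (s + 1)]
      simp [pvT, h]

-- A's second loop, tail part (index k ≥ 1): each entry contributes '-' + its segment.
lemma pvFoldA_suffix (cs : List Char) (ts : List Int) :
    ∀ (r : List Int) (t : Int) (k : Nat) (name : List Char), 1 ≤ k → ts.drop k = t :: r →
    (PySem.List.enumerate (t :: r) ((k : Nat) : Int)).foldl (pvBodyA cs ts) name
      = name ++ '-' :: pvG cs (t :: r) := by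
  intro r
  induction r with
  | nil =>
    intro t k name hk hdrop
    have hlen : ts.length = k + 1 := by
      have := congrArg List.length hdrop
      simp [List.length_drop] at this
      omega
    rw [PySem.List.enumerate_cons, PySem.List.enumerate_nil]
    simp only [List.foldl_cons, List.foldl_nil, pvBodyA]
    rw [if_pos (show ((k : Nat) : Int) > 0 by exact_mod_cast hk)]
    rw [if_pos (show ((k : Nat) : Int) = (ts.length : Int) - 1 by rw [hlen]; push_cast; ring)]
    simp [pvG]
  | cons u r₂ ih =>
    intro t k name hk hdrop
    have hlen : ts.length = k + 2 + r₂.length := by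
      have := congrArg List.length hdrop
      simp [List.length_drop] at this
      omega
    have hne : ¬ (((k : Nat) : Int) = (ts.length : Int) - 1) := by rw [hlen]; push_cast; omega
    have hget : PySem.List.pyGet? ts (((k : Nat) : Int) + 1) = some u := by
      have h1 : (((k : Nat) : Int) + 1) = ((k + 1 : Nat) : Int) := by push_cast; ring
      rw [h1, PySem.List.pyGet?_natCast]
      have h2 : ts[k+1]? = (ts.drop k)[1]? := by rw [List.getElem?_drop]
      rw [h2, hdrop]; rfl
    have hdrop' : ts.drop (k + 1) = u :: r₂ := by
      have h3 : ts.drop (k + 1) = (ts.drop k).drop 1 := by rw [List.drop_drop]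
      rw [h3, hdrop]; rfl
    rw [PySem.List.enumerate_cons]
    simp only [List.foldl_cons]
    have hcast : ((k : Nat) : Int) + 1 = ((k + 1 : Nat) : Int) := by push_cast; ring
    rw [hcast, ih u (k + 1) _ (by omega) hdrop']
    simp only [pvBodyA, if_pos (show ((k : Nat) : Int) > 0 by exact_mod_cast hk), if_neg hne, hget]
    simp [pvG, List.append_assoc]

-- A's second loop on the whole (nonempty) transition list is pvG.
lemma pvFoldA_top (cs : List Char) (ts : List Int) (h : ts ≠ []) :
    (PySem.List.enumerate ts 0).foldl (pvBodyA cs ts) [] = pvG cs ts := by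
  match ts, h with
  | t :: r, _ =>
    rw [PySem.List.enumerate_cons]
    simp only [List.foldl_cons]
    cases r with
    | nil =>
      simp only [PySem.List.enumerate_nil, List.foldl_nil, pvBodyA]
      rw [if_neg (show ¬ ((0 : Int) > 0) by omega)]
      rw [if_pos (show (0 : Int) = (([t] : List Int).length : Int) - 1 by simp)]
      simp [pvG]
    | cons u r₂ =>
      have h0 : (0 : Int) = ((0 : Nat) : Int) := by norm_num
      have hcast : ((0 : Nat) : Int) + 1 = ((1 : Nat) : Int) := by norm_num
      have hget : PySem.List.pyGet? (t :: u :: r₂) (((0 : Nat) : Int) + 1) = some u := by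
        rw [hcast, PySem.List.pyGet?_natCast]; rfl
      have hdrop : (t :: u :: r₂ : List Int).drop 1 = u :: r₂ := rfl
      rw [h0]
      simp only [pvBodyA, if_neg (show ¬ (((0 : Nat) : Int) > 0) by simp),
        if_neg (show ¬ (((0 : Nat) : Int) = (((t :: u :: r₂ : List Int)).length : Int) - 1) by
          simp only [List.length_cons]; push_cast; omega),
        hget]
      rw [hcast, pvFoldA_suffix cs (t :: u :: r₂) r₂ u 1 _ (le_refl 1) hdrop]
      simp [pvG, List.append_assoc]

-- The heart of the A side: pvG on the transition list is pvCore, for any prefix offset.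
lemma pvMain : ∀ (n : Nat) (cs : List Char), cs.length ≤ n → ∀ p : List Char,
    pvG (p ++ cs) (pvT cs p.length) = pvCore cs := by
  intro n
  induction n with
  | zero =>
    intro cs hlen p
    have hnil : cs = [] := by cases cs with | nil => rfl | cons a l => simp at hlen
    subst hnil; simp [pvT, pvG, pvCore]
  | succ n ih =>
    intro cs hlen p
    cases hd : cs.dropWhile pvPred with
    | nil =>
      have hall : ∀ c ∈ cs, pvPred c = true := by
        rw [← List.dropWhile_eq_nil_iff]; exact hd
      rw [pvT_pred cs p.length hall]
      simp [pvG, pvCore, hd]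
    | cons d r =>
      have hsplit : cs = cs.takeWhile pvPred ++ d :: r := by
        conv_lhs => rw [← List.takeWhile_append_dropWhile (p := pvPred) (l := cs)]
        rw [hd]
      set q := cs.takeWhile pvPred with hq
      have hqall : ∀ c ∈ q, pvPred c = true := fun c hc => List.mem_takeWhile_imp hc
      have hdup : d ≠ PySem.Chars.lowerChar d := by
        have := pvDropWhile_head hd; simpa [pvPred] using this
      have hdropm : (p ++ cs).drop (p.length + q.length) = d :: r := by
        rw [hsplit, ← List.append_assoc]
        rw [show p.length + q.length = (p ++ q).length by simp]
        exact List.drop_left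
      have hcore : pvCore cs = PySem.Chars.lowerChar d :: pvF r := by
        simp [pvCore, hd]
      have hT : pvT cs p.length
          = ((p.length + q.length : Nat) : Int) :: pvT r (p.length + q.length + 1) := by
        rw [hsplit, pvT_append, pvT_pred q p.length hqall, pvT, if_pos hdup]
        simp
      cases hd2 : r.dropWhile pvPred with
      | nil =>
        have hall2 : ∀ c ∈ r, pvPred c = true := by
          rw [← List.dropWhile_eq_nil_iff]; exact hd2
        rw [hT, pvT_pred r _ hall2]
        rw [pvG, PySem.List.slice_from_natCast, hdropm, hcore, pvF_pred r hall2]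
        rfl
      | cons e r₂ =>
        have hsplit2 : r = r.takeWhile pvPred ++ e :: r₂ := by
          conv_lhs => rw [← List.takeWhile_append_dropWhile (p := pvPred) (l := r)]
          rw [hd2]
        set q₂ := r.takeWhile pvPred with hq2
        have hq2all : ∀ c ∈ q₂, pvPred c = true := fun c hc => List.mem_takeWhile_imp hc
        have heup : e ≠ PySem.Chars.lowerChar e := by
          have := pvDropWhile_head hd2; simpa [pvPred] using this
        have hT2 : pvT r (p.length + q.length + 1)
            = ((p.length + q.length + 1 + q₂.length : Nat) : Int)
              :: pvT r₂ (p.length + q.length + 1 + q₂.length + 1) := by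
          rw [hsplit2, pvT_append, pvT_pred q₂ _ hq2all, pvT, if_pos heup]
          simp
        rw [hT, hT2, pvG, PySem.List.slice_natCast, hdropm]
        have htake : (d :: r).take (p.length + q.length + 1 + q₂.length - (p.length + q.length))
            = d :: q₂ := by
          have hnum : p.length + q.length + 1 + q₂.length - (p.length + q.length)
              = 1 + q₂.length := by omega
          rw [hnum, hsplit2, show 1 + q₂.length = q₂.length + 1 by omega,
            List.take_succ_cons, List.take_left]
        rw [htake]
        -- the recursive call on the strictly shorter suffix e :: r₂
        have hplen : (p ++ q ++ d :: q₂).length = p.length + q.length + 1 + q₂.length := by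
          simp [List.length_append]; omega
        have happ : (p ++ q ++ d :: q₂) ++ (e :: r₂) = p ++ cs := by
          rw [hsplit, hsplit2]; simp
        have hTsuffix : pvT (e :: r₂) (p.length + q.length + 1 + q₂.length)
            = ((p.length + q.length + 1 + q₂.length : Nat) : Int)
              :: pvT r₂ (p.length + q.length + 1 + q₂.length + 1) := by
          rw [pvT, if_pos heup]; simp
        have hlen2 : (e :: r₂).length ≤ n := by
          have h1 := congrArg List.length hsplit
          have h2 := congrArg List.length hsplit2
          simp [List.length_append] at h1 h2
          simp; omega
        have hih := ih (e :: r₂) hlen2 (p ++ q ++ d :: q₂)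
        rw [hplen, hTsuffix, happ] at hih
        rw [hih]
        have hcore2 : pvCore (e :: r₂) = PySem.Chars.lowerChar e :: pvF r₂ := by
          have : (e :: r₂).dropWhile pvPred = e :: r₂ :=
            List.dropWhile_cons_of_neg (by simpa [pvPred] using heup)
          simp [pvCore, this]
        rw [hcore2, hcore, hsplit2, pvF_append, pvF_pred q₂ hq2all]
        simp only [pvF, List.flatMap_cons, PySem.Chars.lower]
        rw [if_pos heup]
        simp

-- B's loop with the flag already set appends pvF.
lemma pvFoldB_seen (r : List Char) : ∀ out : List Char,
    r.foldl pvStepB (out, true) = (out ++ pvF r, true) := by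
  induction r with
  | nil => intro out; simp [pvF]
  | cons c r ih =>
    intro out
    by_cases h : c ≠ PySem.Chars.lowerChar c
    · simp only [List.foldl_cons, pvStepB, if_pos h, ih]
      simp [pvF, h]
    · simp only [List.foldl_cons, pvStepB, if_neg h, ih]
      simp only [pvF, List.flatMap_cons, if_neg h]
      simp

-- B's loop emits nothing while only non-uppercase chars have been seen.
lemma pvFoldB_pred (q : List Char) (h : ∀ c ∈ q, pvPred c = true) :
    q.foldl pvStepB ([], false) = ([], false) := by
  induction q with
  | nil => rfl
  | cons c r ih =>
    have hc : c = PySem.Chars.lowerChar c := by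
      have := h c (by simp); simpa [pvPred] using this
    have hcond : ¬ (c ≠ PySem.Chars.lowerChar c) := by simpa using hc
    simp only [List.foldl_cons, pvStepB, if_neg hcond]
    simpa using ih (fun d hd => h d (by simp [hd]))

-- B's loop computes pvCore.
lemma pvB_core (cs : List Char) : (cs.foldl pvStepB ([], false)).1 = pvCore cs := by
  cases hd : cs.dropWhile pvPred with
  | nil =>
    have hall : ∀ c ∈ cs, pvPred c = true := by
      rw [← List.dropWhile_eq_nil_iff]; exact hd
    rw [pvFoldB_pred cs hall]; simp [pvCore, hd]
  | cons d r =>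
    have hsplit : cs = cs.takeWhile pvPred ++ d :: r := by
      conv_lhs => rw [← List.takeWhile_append_dropWhile (p := pvPred) (l := cs)]
      rw [hd]
    have hqall : ∀ c ∈ cs.takeWhile pvPred, pvPred c = true :=
      fun c hc => List.mem_takeWhile_imp hc
    have hdup : d ≠ PySem.Chars.lowerChar d := by
      have := pvDropWhile_head hd; simpa [pvPred] using this
    rw [hsplit, List.foldl_append, pvFoldB_pred _ hqall]
    simp only [List.foldl_cons, pvStepB, if_pos hdup]
    simp only [if_true, Bool.false_eq_true, if_false, List.nil_append]
    rw [pvFoldB_seen]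
    simp [pvCore, hd, ← hsplit]

-- A's loops compute pvCore.
lemma pvA_core (cs : List Char) :
    (PySem.List.enumerate (pvT cs 0) 0).foldl (pvBodyA cs (pvT cs 0)) [] = pvCore cs := by
  cases hd : cs.dropWhile pvPred with
  | nil =>
    have hall : ∀ c ∈ cs, pvPred c = true := by
      rw [← List.dropWhile_eq_nil_iff]; exact hd
    rw [pvT_pred cs 0 hall]
    simp [PySem.List.enumerate_nil, pvCore, hd]
  | cons d r =>
    have hsplit : cs = cs.takeWhile pvPred ++ d :: r := by
      conv_lhs => rw [← List.takeWhile_append_dropWhile (p := pvPred) (l := cs)]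
      rw [hd]
    have hqall : ∀ c ∈ cs.takeWhile pvPred, pvPred c = true :=
      fun c hc => List.mem_takeWhile_imp hc
    have hdup : d ≠ PySem.Chars.lowerChar d := by
      have := pvDropWhile_head hd; simpa [pvPred] using this
    have hT : pvT cs 0 ≠ [] := by
      rw [hsplit, pvT_append, pvT_pred _ 0 hqall, pvT, if_pos hdup]
      simp
    rw [pvFoldA_top cs _ hT]
    have := pvMain cs.length cs (le_refl _) []
    simpa using this

-- ===== VERDICT (by name: the statement is the Claim_ definition above) =====
theorem class_name_to_name_spec : Claim_equal_class_name_to_name := by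
  intro s _
  show class_name_to_name s = class_name_to_name_alt s
  simp only [class_name_to_name, class_name_to_name_alt]
  have h1 : (PySem.List.enumerate (PySem.Str.replace s "_" "-").toList 0).foldl
      (fun acc p => if p.2 ≠ PySem.Chars.lowerChar p.2 then acc ++ [p.1] else acc) ([] : List Int)
      = pvT (PySem.Str.replace s "_" "-").toList 0 := by
    rw [show (0 : Int) = ((0 : Nat) : Int) from by norm_num, pvTs_eq]
    simp
  rw [h1, pvA_core, pvB_core]
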